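-- pv_equiv track=rewrite | github.com/KYUJEONGLEE/SW-AI-W02-05 | week2/problem-solving/난이도상_문자열_광고_플래4.py | advertisement
-- ===== SOURCE A (Python) =====
-- def advertisement(n):
--
--     length = len(n)
--     min = length
--     for i in range(1, length):
--         if n[:i] == n[-i:]:
--             # 슬라이싱은 비용이 많이 나간다. 시간복잡도 위험
--             if min > length - len(n[:i]):
--                 min = length - len(n[:i])
--
--     return min
-- ===== SOURCE B (Python) =====
-- def advertisement(n):
--     # KMP failure function: the answer is len(n) minus the longest proper
--     # border of n, computed in one linear pass instead of quadratic slicing.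
--     if not n:
--         return 0
--     f = [0]
--     k = 0
--     for c in n[1:]:
--         while k and c != n[k]:
--             k = f[k - 1]
--         if c == n[k]:
--             k += 1
--         f.append(k)
--     return len(n) - f[-1]
-- ===== Notes on version B (the rewrite author's own statement) =====
-- stated objective: faster
-- what changed: Replaced the quadratic scan that slices and compares n[:i] with n[-i:] for every i by a single KMP failure-function pass whose last entry is the longest proper border, so the answer is len(n) minus that entry.
import Mathlib
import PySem

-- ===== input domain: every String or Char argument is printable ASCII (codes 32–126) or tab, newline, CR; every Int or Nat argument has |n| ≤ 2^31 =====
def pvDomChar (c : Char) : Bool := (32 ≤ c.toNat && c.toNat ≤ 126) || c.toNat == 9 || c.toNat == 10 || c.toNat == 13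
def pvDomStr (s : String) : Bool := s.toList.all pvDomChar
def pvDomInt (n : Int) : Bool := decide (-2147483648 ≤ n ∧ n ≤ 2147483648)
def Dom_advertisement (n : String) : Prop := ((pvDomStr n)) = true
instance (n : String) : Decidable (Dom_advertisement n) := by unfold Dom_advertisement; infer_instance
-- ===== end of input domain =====

-- B replaces A's quadratic slice-and-compare scan by a linear KMP failure-function pass (objective: faster).

-- ===== PORT A =====
def advertisement (n : String) : Int :=
  let cs := n.toList
  let length : Int := PySem.Str.len n
  (PySem.List.pyRange 1 length 1).foldl (fun m i =>
    if PySem.List.slice cs none (some i) = PySem.List.slice cs (some (-i)) none then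
      if m > length - ((PySem.List.slice cs none (some i)).length : Int) then
        length - ((PySem.List.slice cs none (some i)).length : Int)
      else m
    else m) length

-- ===== PORT B =====
-- the `while k and c != n[k]: k = f[k-1]` loop; fuel = current k bounds its iteration count
def kmpWhile (s : List Char) (f : List Nat) (c : Char) : Nat → Nat → Nat
  | _, 0 => 0
  | 0, k+1 => k+1
  | fuel+1, k+1 => if c ≠ s.getD (k+1) 'A' then kmpWhile s f c fuel (f.getD k 0) else k+1

-- body of the `for c in n[1:]` loop: state is (f, k)
def kmpStep (s : List Char) (st : List Nat × Nat) (c : Char) : List Nat × Nat :=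
  let k1 := kmpWhile s st.1 c st.2 st.2
  let k2 := if c = s.getD k1 'A' then k1 + 1 else k1
  (st.1 ++ [k2], k2)

def advertisement_alt (n : String) : Int :=
  let s := n.toList
  if s = [] then 0
  else
    let st := s.tail.foldl (kmpStep s) ([0], 0)
    PySem.Str.len n - ((PySem.List.pyGetD st.1 (-1) 0 : Nat) : Int)

-- ===== PRECONDITION & SPEC =====
def Spec_advertisement (n : String) (out : Int) : Prop := out = advertisement_alt n
instance (n : String) (out : Int) : Decidable (Spec_advertisement n out) := by unfold Spec_advertisement; infer_instance

-- ===== CLAIM (what is proved, stated in full; the proofs are below) =====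
def Claim_equal_advertisement : Prop := ∀ (n : String), Dom_advertisement n → Spec_advertisement n (advertisement n)

-- ===== LEMMAS AND PROOFS =====

-- j is a (proper) border length of t
def isB (t : List Char) (j : Nat) : Prop := j < t.length ∧ t.take j = t.drop (t.length - j)

-- largest border length ≤ k (0 if none)
def bestUpto (t : List Char) : Nat → Nat
  | 0 => 0
  | k+1 => if t.take (k+1) = t.drop (t.length - (k+1)) then k+1 else bestUpto t k

-- longest proper border length
def lb (t : List Char) : Nat := bestUpto t (t.length - 1)

theorem bestUpto_le (t : List Char) (k : Nat) : bestUpto t k ≤ k := by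
  induction k with
  | zero => simp [bestUpto]
  | succ k ih => simp only [bestUpto]; split <;> omega

theorem bestUpto_border (t : List Char) (k : Nat) :
    t.take (bestUpto t k) = t.drop (t.length - bestUpto t k) := by
  induction k with
  | zero => simp [bestUpto]
  | succ k ih => simp only [bestUpto]; split <;> simp_all

theorem bestUpto_max (t : List Char) (k j : Nat) (hj : j ≤ k)
    (h : t.take j = t.drop (t.length - j)) : j ≤ bestUpto t k := by
  induction k with
  | zero => omega
  | succ k ih =>
    simp only [bestUpto]; split
    · omega
    · rename_i hne
      rcases Nat.lt_or_ge j (k+1) with h' | h'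
      · exact ih (by omega)
      · have : j = k+1 := by omega
        subst this; exact absurd h hne

theorem lb_lt (t : List Char) (h : t ≠ []) : lb t < t.length := by
  have := bestUpto_le t (t.length - 1)
  have : t.length ≠ 0 := by simpa using h
  unfold lb at *; omega

theorem lb_border (t : List Char) : t.take (lb t) = t.drop (t.length - lb t) :=
  bestUpto_border t _

theorem lb_isB (t : List Char) (h : t ≠ []) : isB t (lb t) :=
  ⟨lb_lt t h, lb_border t⟩

theorem lb_max (t : List Char) (j : Nat) (h : isB t j) : j ≤ lb t := by
  have h1 := h.1
  exact bestUpto_max t _ j (by omega) h.2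

-- composing borders: a smaller border of t is a border of the prefix cut at a larger border
theorem isB_take (t : List Char) (j k : Nat) (hjk : j < k) (hk : isB t k) (hj : isB t j) :
    isB (t.take k) j := by
  obtain ⟨hk1, hk2⟩ := hk
  obtain ⟨hj1, hj2⟩ := hj
  have hlen : (t.take k).length = k := by simp; omega
  refine ⟨by rw [hlen]; omega, ?_⟩
  rw [hlen, List.take_take, hk2, List.drop_drop]
  have h1 : min j k = j := by omega
  have h2 : t.length - k + (k - j) = t.length - j := by omega
  rw [h1, h2]
  exact hj2

-- a border of a border-prefix of t is a border of t
theorem isB_lift (t : List Char) (j k : Nat) (hk : isB t k) (hj : isB (t.take k) j) :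
    isB t j := by
  obtain ⟨hk1, hk2⟩ := hk
  obtain ⟨hj1, hj2⟩ := hj
  have hlen : (t.take k).length = k := by simp; omega
  rw [hlen] at hj1 hj2
  refine ⟨by omega, ?_⟩
  rw [List.take_take] at hj2
  rw [hk2, List.drop_drop] at hj2
  have h1 : min j k = j := by omega
  have h2 : t.length - k + (k - j) = t.length - j := by omega
  rw [h1, h2] at hj2
  exact hj2

-- extending a border by one matching character
theorem isB_append (t : List Char) (c : Char) (j : Nat) :
    isB (t ++ [c]) (j+1) ↔ (isB t j ∧ t.getD j 'A' = c) := by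
  constructor
  · rintro ⟨h1, h2⟩
    simp at h1
    have hj : j < t.length := by omega
    rw [List.take_append_of_le_length (by omega), List.length_append] at h2
    simp only [List.length_singleton] at h2
    have hd : t.length + 1 - (j+1) = t.length - j := by omega
    rw [hd, List.drop_append_of_le_length (by omega)] at h2
    rw [List.take_add_one] at h2
    have hg : t[j]? = some t[j] := List.getElem?_eq_getElem hj
    rw [hg] at h2
    have hlen : (List.take j t).length = (List.drop (t.length - j) t).length := by
      simp; omega
    obtain ⟨e1, e2⟩ := List.append_inj h2 (by simpa using hlen)
    refine ⟨⟨hj, e1⟩, ?_⟩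
    simp at e2
    rw [List.getD_eq_getElem t 'A' hj, e2]
  · rintro ⟨⟨h1, h2⟩, h3⟩
    refine ⟨by simp; omega, ?_⟩
    rw [List.take_append_of_le_length (by omega), List.length_append]
    simp only [List.length_singleton]
    have hd : t.length + 1 - (j+1) = t.length - j := by omega
    rw [hd, List.drop_append_of_le_length (by omega)]
    rw [List.take_add_one]
    have hg : t[j]? = some t[j] := List.getElem?_eq_getElem h1
    rw [hg, h2]
    congr 1
    simp
    rw [← h3, List.getD_eq_getElem t 'A' h1]

theorem kmpWhile_spec (s : List Char) (f : List Nat) (c : Char) (m : Nat)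
    (hm : m ≤ s.length)
    (hf : ∀ i, i < m → f.getD i 0 = lb (s.take (i+1))) :
    ∀ fuel k, k ≤ fuel → isB (s.take m) k →
      (∀ j, isB (s.take m) j → s.getD j 'A' = c → j ≤ k) →
      isB (s.take m) (kmpWhile s f c fuel k) ∧
      (∀ j, isB (s.take m) j → s.getD j 'A' = c → j ≤ kmpWhile s f c fuel k) ∧
      (kmpWhile s f c fuel k = 0 ∨ s.getD (kmpWhile s f c fuel k) 'A' = c) := by
  intro fuel
  induction fuel with
  | zero =>
    intro k hk hisB hmax
    have hk0 : k = 0 := by omega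
    subst hk0
    exact ⟨hisB, hmax, Or.inl rfl⟩
  | succ fuel ih =>
    intro k hk hisB hmax
    match k with
    | 0 => exact ⟨hisB, hmax, Or.inl rfl⟩
    | k'+1 =>
      by_cases hc : c = s.getD (k'+1) 'A'
      · rw [kmpWhile, if_neg (by simpa using hc)]
        exact ⟨hisB, hmax, Or.inr hc.symm⟩
      · rw [kmpWhile, if_pos hc]
        have tlen : (s.take m).length = m := by simp; omega
        have hkm : k'+1 < m := by have := hisB.1; omega
        have hfk : f.getD k' 0 = lb (s.take (k'+1)) := hf k' (by omega)
        have htt : (s.take m).take (k'+1) = s.take (k'+1) := by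
          rw [List.take_take]; congr 1; omega
        have hne : s.take (k'+1) ≠ [] := by
          have : (s.take (k'+1)).length = k'+1 := by simp; omega
          intro h; rw [h] at this; simp at this
        have hlb := lb_isB (s.take (k'+1)) hne
        have h1 : f.getD k' 0 ≤ fuel := by
          have h2 := bestUpto_le (s.take (k'+1)) ((s.take (k'+1)).length - 1)
          unfold lb at hfk
          have : (s.take (k'+1)).length = k'+1 := by simp; omega
          omega
        have h2 : isB (s.take m) (f.getD k' 0) := by
          rw [hfk]
          exact isB_lift (s.take m) _ (k'+1) hisB (by rw [htt]; exact hlb)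
        have h3 : ∀ j, isB (s.take m) j → s.getD j 'A' = c → j ≤ f.getD k' 0 := by
          intro j hjB hjc
          have hle : j ≤ k'+1 := hmax j hjB hjc
          have hne2 : j ≠ k'+1 := by
            intro h; subst h; exact hc hjc.symm
          rw [hfk]
          apply lb_max
          rw [← htt]
          exact isB_take (s.take m) j (k'+1) (by omega) hisB hjB
        exact ih (f.getD k' 0) h1 h2 h3

theorem getD_take (s : List Char) (m j : Nat) (h : j < m) :
    (s.take m).getD j 'A' = s.getD j 'A' := by
  by_cases hj : j < s.length
  · rw [List.getD_eq_getElem _ _ (by simp; omega), List.getD_eq_getElem _ _ hj,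
      List.getElem_take]
  · rw [List.getD_eq_default _ _ (by simp; omega), List.getD_eq_default _ _ (by omega)]

theorem kmpStep_spec (s : List Char) (m : Nat) (hm1 : 1 ≤ m) (hm : m < s.length)
    (f : List Nat) (hf : ∀ i, i < m → f.getD i 0 = lb (s.take (i+1))) :
    kmpStep s (f, lb (s.take m)) (s.getD m 'A') =
      (f ++ [lb (s.take (m+1))], lb (s.take (m+1))) := by
  have tlen : (s.take m).length = m := by simp; omega
  have tne : s.take m ≠ [] := by
    intro h; rw [h] at tlen; simp at tlen; omega
  have hentry := lb_isB (s.take m) tne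
  obtain ⟨hr1, hr2, hr3⟩ := kmpWhile_spec s f (s.getD m 'A') m (by omega) hf
    (lb (s.take m)) (lb (s.take m)) le_rfl hentry
    (fun j hj _ => lb_max (s.take m) j hj)
  set c := s.getD m 'A' with hc
  set r := kmpWhile s f c (lb (s.take m)) (lb (s.take m)) with hrdef
  have htake1 : s.take (m+1) = s.take m ++ [c] := by
    rw [List.take_add_one, List.getElem?_eq_getElem hm, hc,
      List.getD_eq_getElem s 'A' hm]
    simp
  have key : lb (s.take (m+1)) = (if c = s.getD r 'A' then r + 1 else r) := by
    by_cases hcr : c = s.getD r 'A'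
    · rw [if_pos hcr, htake1]
      apply le_antisymm
      · have hb := lb_isB (s.take m ++ [c]) (by simp)
        rcases hbe : lb (s.take m ++ [c]) with _ | b'
        · omega
        · rw [hbe] at hb
          obtain ⟨hb', hbc⟩ := (isB_append (s.take m) c b').mp hb
          have : b' ≤ r := hr2 b' hb' (by rw [← getD_take s m b' (by have := hb'.1; omega)]; exact hbc)
          omega
      · apply lb_max
        apply (isB_append (s.take m) c r).mpr
        refine ⟨hr1, ?_⟩
        rw [getD_take s m r (by have := hr1.1; omega)]
        exact hcr.symm
    · rw [if_neg hcr, htake1]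
      have hr0 : r = 0 := by
        rcases hr3 with h | h
        · exact h
        · exact absurd h.symm hcr
      have hb := lb_isB (s.take m ++ [c]) (by simp)
      rcases hbe : lb (s.take m ++ [c]) with _ | b'
      · omega
      · rw [hbe] at hb
        obtain ⟨hb', hbc⟩ := (isB_append (s.take m) c b').mp hb
        have hble : b' ≤ r := hr2 b' hb' (by rw [← getD_take s m b' (by have := hb'.1; omega)]; exact hbc)
        rw [hr0] at hble
        have hb0 : b' = 0 := by omega
        subst hb0
        exfalso
        apply hcr
        rw [hr0, ← getD_take s m 0 (by omega)]
        exact hbc.symm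
  simp only [kmpStep, ← hrdef]
  rw [← key]

theorem map_range_getD (g : Nat → Nat) (n i : Nat) (h : i < n) :
    ((List.range n).map g).getD i 0 = g i := by
  rw [List.getD_eq_getElem _ _ (by simpa using h)]
  simp

theorem kmp_fold (s : List Char) : ∀ j, j ≤ s.length - 1 →
    (s.tail.take j).foldl (kmpStep s) ([0], 0) =
      ((List.range (j+1)).map (fun i => lb (s.take (i+1))), lb (s.take (j+1))) := by
  intro j
  induction j with
  | zero =>
    intro _
    have h0 : lb (s.take 1) = 0 := by
      unfold lb
      have h1 : (s.take 1).length - 1 = 0 := by simp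
      rw [h1]
      rfl
    simp [h0]
  | succ j ih =>
    intro hj
    have hjs : j + 1 < s.length := by omega
    have hjtail : j < s.tail.length := by simp; omega
    have htake : s.tail.take (j+1) = s.tail.take j ++ [s.getD (j+1) 'A'] := by
      rw [List.take_add_one, List.getElem?_eq_getElem hjtail]
      congr 1
      rw [List.getD_eq_getElem s 'A' hjs]
      simp [List.getElem_tail]
    rw [htake, List.foldl_append, ih (by omega)]
    simp only [List.foldl_cons, List.foldl_nil]
    rw [kmpStep_spec s (j+1) (by omega) hjs _
      (fun i hi => map_range_getD (fun i => lb (s.take (i+1))) (j+1) i hi)]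
    simp [List.range_succ]

theorem A_fold (s : List Char) : ∀ k : Nat, k ≤ s.length →
    (PySem.List.pyRange 1 (k : Int) 1).foldl (fun m i =>
      if PySem.List.slice s none (some i) = PySem.List.slice s (some (-i)) none then
        if m > (s.length : Int) - ((PySem.List.slice s none (some i)).length : Int) then
          (s.length : Int) - ((PySem.List.slice s none (some i)).length : Int)
        else m
      else m) (s.length : Int) = (s.length : Int) - (bestUpto s (k-1) : Int) := by
  intro k
  induction k with
  | zero =>
    intro _
    rw [show ((0:Nat):Int) = 0 by norm_num, PySem.List.pyRange_one_eq_nil (by norm_num)]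
    simp [bestUpto]
  | succ k ih =>
    intro hk
    rcases Nat.eq_zero_or_pos k with hk0 | hkpos
    · subst hk0
      rw [show ((1:Nat):Int) = 1 by norm_num, PySem.List.pyRange_one_eq_nil (by norm_num)]
      simp [bestUpto]
    · obtain ⟨k', rfl⟩ : ∃ k', k = k' + 1 := ⟨k-1, by omega⟩
      have hcast : ((k'+1+1 : Nat) : Int) = ((k'+1 : Nat) : Int) + 1 := by push_cast; ring
      rw [hcast, PySem.List.pyRange_one_succ_right (by exact_mod_cast hkpos),
        List.foldl_append, ih (by omega)]
      simp only [List.foldl_cons, List.foldl_nil, Nat.add_sub_cancel]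
      rw [PySem.List.slice_to_natCast, PySem.List.slice_from_neg_natCast s (k'+1) hkpos]
      have hlen : (s.take (k'+1)).length = k' + 1 := by simp; omega
      have hble := bestUpto_le s k'
      by_cases hcond : s.take (k'+1) = s.drop (s.length - (k'+1))
      · rw [if_pos hcond, if_pos (by rw [hlen]; push_cast; omega)]
        rw [hlen]
        have : bestUpto s (k'+1) = k'+1 := by rw [bestUpto, if_pos hcond]
        rw [this]
      · rw [if_neg hcond]
        have : bestUpto s (k'+1) = bestUpto s k' := by rw [bestUpto, if_neg hcond]
        rw [this]

theorem adv_eq (n : String) :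
    advertisement n = (n.toList.length : Int) - (lb n.toList : Int) := by
  have h := A_fold n.toList n.toList.length le_rfl
  simp only [advertisement, PySem.Str.len_eq]
  rw [h, lb]

theorem adv_alt_eq (n : String) :
    advertisement_alt n = (n.toList.length : Int) - (lb n.toList : Int) := by
  by_cases hnil : n.toList = []
  · simp [advertisement_alt, hnil, lb, bestUpto]
  · have hlen1 : 1 ≤ n.toList.length := by
      have := List.length_pos_iff.mpr hnil; omega
    have htail : n.toList.tail = n.toList.tail.take (n.toList.length - 1) := by
      rw [show n.toList.length - 1 = n.toList.tail.length by simp, List.take_length]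
    have hfold := kmp_fold n.toList (n.toList.length - 1) le_rfl
    rw [← htail] at hfold
    simp only [advertisement_alt, if_neg hnil, hfold, PySem.Str.len_eq]
    have hrange : List.range (n.toList.length - 1 + 1) =
        List.range (n.toList.length - 1) ++ [n.toList.length - 1] := List.range_succ
    rw [hrange, List.map_append]
    simp only [List.map_cons, List.map_nil]
    rw [PySem.List.pyGetD_neg_one_append_singleton]
    have hfin : n.toList.length - 1 + 1 = n.toList.length := by omega
    rw [hfin, List.take_length]

-- ===== VERDICT (by name: the statement is the Claim_ definition above) =====
theorem advertisement_spec : Claim_equal_advertisement := by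
  intro n _
  unfold Spec_advertisement
  rw [adv_eq, adv_alt_eq]
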